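-- pv_equiv track=rewrite | github.com/aorursy/KT_dataset_py | tanapatruengsatra_22p22c0021-w2hw1-27092020.py | create_fold
-- ===== SOURCE A (Python) =====
-- def create_fold(data):
--     l = len(data)
--     fold = []
--
--     for i in range(l):
--         m = i%10
--         if i < 10:
--             fold.append([])
--         fold[m].append(i)
--
--     return fold
-- ===== SOURCE B (Python) =====
-- def create_fold(data):
--     l = len(data)
--     return [list(range(m, l, 10)) for m in range(min(l, 10))]
-- ===== Notes on version B (the rewrite author's own statement) =====
-- stated objective: simpler
-- what changed: Replaces A's single indexed pass that lazily creates folds and appends each index to fold[i%10] with a direct closed-form construction: min(len(data),10) folds, each built at once as list(range(m, len(data), 10)).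
import Mathlib
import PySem

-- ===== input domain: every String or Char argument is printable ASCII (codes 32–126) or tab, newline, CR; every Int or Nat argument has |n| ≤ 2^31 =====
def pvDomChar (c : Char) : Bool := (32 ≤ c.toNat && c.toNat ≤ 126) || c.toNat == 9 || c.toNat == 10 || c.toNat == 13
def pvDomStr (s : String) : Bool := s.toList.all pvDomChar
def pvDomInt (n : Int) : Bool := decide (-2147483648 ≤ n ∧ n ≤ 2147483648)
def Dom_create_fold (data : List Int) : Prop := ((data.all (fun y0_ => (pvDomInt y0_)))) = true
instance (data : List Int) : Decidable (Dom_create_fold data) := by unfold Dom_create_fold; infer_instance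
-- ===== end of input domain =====

-- B replaces A's single indexed pass (append each i to fold[i%10], lazily creating folds) by a
-- closed-form construction: min(len,10) folds, fold m built at once as range(m, len, 10) (objective: simpler).

-- ===== PORT A =====
def create_fold (data : List Int) : List (List Int) :=
  let l := PySem.List.len data
  (PySem.List.pyRange 0 l 1).foldl
    (fun fold i =>
      let m := PySem.Int.mod i 10
      let fold1 := if i < 10 then fold ++ [([] : List Int)] else fold
      -- fold[m].append(i): m = i % 10 is always a valid index of fold here, so List.modify is exact
      fold1.modify m.toNat (fun xs => xs ++ [i])) []

-- ===== PORT B =====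
def create_fold_alt (data : List Int) : List (List Int) :=
  let l := PySem.List.len data
  (PySem.List.pyRange 0 (min l 10) 1).map (fun m => PySem.List.pyRange m l 10)

-- ===== PRECONDITION & SPEC =====
def Spec_create_fold (data : List Int) (out : List (List Int)) : Prop := out = create_fold_alt data
instance (data : List Int) (out : List (List Int)) : Decidable (Spec_create_fold data out) := by unfold Spec_create_fold; infer_instance

-- ===== CLAIM (what is proved, stated in full; the proofs are below) =====
def Claim_equal_create_fold : Prop := ∀ (data : List Int), Dom_create_fold data → Spec_create_fold data (create_fold data)

-- ===== LEMMAS AND PROOFS =====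

-- A's loop body, named for the proofs (definitionally the lambda inside create_fold)
def pvStepA (fold : List (List Int)) (i : Int) : List (List Int) :=
  let m := PySem.Int.mod i 10
  let fold1 := if i < 10 then fold ++ [([] : List Int)] else fold
  fold1.modify m.toNat (fun xs => xs ++ [i])

theorem create_fold_eq_loop (data : List Int) :
    create_fold data = (PySem.List.pyRange 0 (PySem.List.len data) 1).foldl pvStepA [] := rfl

theorem pyRange_ten_self (m : Int) : PySem.List.pyRange m m 10 = [] := by
  rw [PySem.List.pyRange_of_pos m m (by norm_num : (0:Int) < 10)]
  simp

theorem stride_succ (m n : Int) (h0 : 0 ≤ m) (hmn : m ≤ n) :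
    PySem.List.pyRange m (n + 1) 10 =
      PySem.List.pyRange m n 10 ++ (if (n - m) % 10 = 0 then [n] else []) := by
  rw [PySem.List.pyRange_of_pos m (n + 1) (by norm_num : (0:Int) < 10),
      PySem.List.pyRange_of_pos m n (by norm_num : (0:Int) < 10)]
  by_cases hd : (n - m) % 10 = 0
  · have hc : (if m < n + 1 then ((n + 1 - m + 10 - 1) / 10).toNat else 0)
        = (if m < n then ((n - m + 10 - 1) / 10).toNat else 0) + 1 := by
      split_ifs <;> omega
    rw [hc, List.range_succ, List.map_append, if_pos hd]
    congr 1
    simp only [List.map_cons, List.map_nil, List.cons.injEq, and_true]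
    split_ifs <;> omega
  · have hc : (if m < n + 1 then ((n + 1 - m + 10 - 1) / 10).toNat else 0)
        = (if m < n then ((n - m + 10 - 1) / 10).toNat else 0) := by
      split_ifs <;> omega
    rw [hc, if_neg hd, List.append_nil]

theorem modify_append_eq {α : Type} (xs : List α) (y : α) (f : α → α) (i : Nat) (h : i = xs.length) :
    (xs ++ [y]).modify i f = xs ++ [f y] := by
  subst h
  induction xs with
  | nil => simp [List.modify_cons]
  | cons a t ih => simp [ih]

theorem loop_eq (n : Nat) :
    (PySem.List.pyRange 0 (n : Int) 1).foldl pvStepA [] =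
      (PySem.List.pyRange 0 (min (n : Int) 10) 1).map (fun m => PySem.List.pyRange m (n : Int) 10) := by
  induction n with
  | zero =>
    simp only [Nat.cast_zero]
    rw [show min (0:Int) 10 = 0 from by norm_num]
    rw [PySem.List.pyRange_one_eq_nil (le_refl (0:Int))]
    rfl
  | succ n ih =>
    push_cast
    rw [PySem.List.pyRange_one_succ_right (Int.natCast_nonneg n), List.foldl_append]
    simp only [List.foldl_cons, List.foldl_nil]
    rw [ih]
    simp only [pvStepA]
    have hm : (PySem.Int.mod (n : Int) 10).toNat = n % 10 := by
      rw [PySem.Int.mod_eq_emod_of_pos (by norm_num : (0:Int) < 10)]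
      omega
    rw [hm]
    by_cases h10 : n < 10
    · rw [if_pos (show ((n : Int)) < 10 by exact_mod_cast h10)]
      rw [Nat.mod_eq_of_lt h10]
      rw [show min ((n : Int)) 10 = (n : Int) from by omega,
          show min ((n : Int) + 1) 10 = (n : Int) + 1 from by omega]
      rw [modify_append_eq _ _ _ n (by
        simp only [List.length_map, PySem.List.length_pyRange_one]
        omega)]
      rw [PySem.List.pyRange_one_succ_right (Int.natCast_nonneg n), List.map_append]
      simp only [List.map_cons, List.map_nil, List.nil_append]
      congr 1
      · apply List.map_congr_left
        intro m hmem
        rw [PySem.List.mem_pyRange_one] at hmem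
        rw [stride_succ m (n : Int) hmem.1 (le_of_lt hmem.2)]
        rw [if_neg (show ¬((n : Int) - m) % 10 = 0 by omega), List.append_nil]
      · rw [stride_succ (n : Int) (n : Int) (Int.natCast_nonneg n) le_rfl, pyRange_ten_self]
        rw [if_pos (by omega : ((n : Int) - (n : Int)) % 10 = 0)]
        rfl
    · rw [if_neg (show ¬((n : Int)) < 10 by exact_mod_cast h10)]
      rw [show min ((n : Int)) 10 = 10 from by omega,
          show min ((n : Int) + 1) 10 = 10 from by omega]
      apply List.ext_getElem
      · simp [List.length_modify]
      · intro j h1 h2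
        have hj10 : j < 10 := by
          simp only [List.length_map, PySem.List.length_pyRange_one] at h2
          omega
        rw [List.getElem_modify]
        simp only [List.getElem_map, PySem.List.getElem_pyRange_one, zero_add]
        rw [stride_succ (j : Int) (n : Int) (Int.natCast_nonneg j) (by omega)]
        by_cases hjn : n % 10 = j
        · rw [if_pos hjn, if_pos (show ((n : Int) - (j : Int)) % 10 = 0 by omega)]
        · rw [if_neg hjn, if_neg (show ¬((n : Int) - (j : Int)) % 10 = 0 by omega), List.append_nil]

-- ===== VERDICT (by name: the statement is the Claim_ definition above) =====
theorem create_fold_spec : Claim_equal_create_fold := by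
  intro data _
  unfold Spec_create_fold
  rw [create_fold_eq_loop]
  show _ = create_fold_alt data
  unfold create_fold_alt
  simp only [PySem.List.len_eq]
  exact loop_eq data.length
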